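-- pv_equiv track=rewrite | github.com/lukaszlozinski/mlelectric-tenders | matcher/reference_matcher.py | _normalize_operator
-- ===== SOURCE A (Python) =====
-- OPERATOR_ALIASES = {
--     "pge dystrybucja": "PGE", "pge": "PGE",
--     "tauron dystrybucja": "TAURON", "tauron": "TAURON",
--     "enea operator": "ENEA", "enea": "ENEA",
--     "energa-operator": "ENERGA", "energa operator": "ENERGA", "energa": "ENERGA",
--     "polskie sieci elektroenergetyczne": "PSE", "pse": "PSE",
--     "aldesa": "ALDESA", "altis": "ALTIS",
--     "emca volt": "EMCA", "emca": "EMCA",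
-- }
--
-- def _normalize_operator(raw: str) -> str:
--     if not raw:
--         return ""
--     low = raw.lower().strip()
--     for alias, canonical in sorted(OPERATOR_ALIASES.items(), key=lambda x: -len(x[0])):
--         if alias in low:
--             return canonical
--     return raw.split()[0].upper()
-- ===== SOURCE B (Python) =====
-- OPERATOR_ALIASES = {
--     "pge dystrybucja": "PGE", "pge": "PGE",
--     "tauron dystrybucja": "TAURON", "tauron": "TAURON",
--     "enea operator": "ENEA", "enea": "ENEA",
--     "energa-operator": "ENERGA", "energa operator": "ENERGA", "energa": "ENERGA",
--     "polskie sieci elektroenergetyczne": "PSE", "pse": "PSE",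
--     "aldesa": "ALDESA", "altis": "ALTIS",
--     "emca volt": "EMCA", "emca": "EMCA",
-- }
--
-- def _normalize_operator(raw: str) -> str:
--     if not raw:
--         return ""
--     low = raw.lower().strip()
--     max_len = max(len(a) for a in OPERATOR_ALIASES)
--     for n in range(max_len, 0, -1):
--         for alias, canonical in OPERATOR_ALIASES.items():
--             if len(alias) == n and alias in low:
--                 return canonical
--     return raw.split()[0].upper()
-- ===== Notes on version B (the rewrite author's own statement) =====
-- stated objective: alternative
-- what changed: B removes A's per-call sort of the alias table and first-match scan; instead it computes the maximum alias length once and scans candidate lengths downward, checking the dict in insertion order for a contained alias of exactly that length (a counting/bucket-style search that reproduces the stable longest-first order without sorting).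
-- outside the precondition, e.g. on _normalize_operator('   '): A raises IndexError, B raises IndexError
import Mathlib
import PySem

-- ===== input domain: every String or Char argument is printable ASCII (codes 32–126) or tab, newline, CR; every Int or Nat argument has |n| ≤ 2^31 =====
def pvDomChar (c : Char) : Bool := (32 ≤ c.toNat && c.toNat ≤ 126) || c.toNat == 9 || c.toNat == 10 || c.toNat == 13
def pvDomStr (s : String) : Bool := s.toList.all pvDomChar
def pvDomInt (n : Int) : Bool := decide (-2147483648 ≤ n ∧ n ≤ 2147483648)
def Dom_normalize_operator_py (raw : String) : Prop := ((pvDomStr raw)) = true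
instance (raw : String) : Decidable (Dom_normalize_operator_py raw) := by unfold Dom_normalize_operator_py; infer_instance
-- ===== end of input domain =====

-- B replaces A's per-call sort of the alias table + first-match scan by a bucket-style search:
-- max alias length computed once, then candidate lengths scanned downward, checking the dict in
-- insertion order for a contained alias of exactly that length (alternative; same result).

-- the module-level OPERATOR_ALIASES dict, in insertion order (shared by both ports, like the Python module constant)
def pvOperatorAliases : List (String × String) :=
  [("pge dystrybucja", "PGE"), ("pge", "PGE"),
   ("tauron dystrybucja", "TAURON"), ("tauron", "TAURON"),
   ("enea operator", "ENEA"), ("enea", "ENEA"),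
   ("energa-operator", "ENERGA"), ("energa operator", "ENERGA"), ("energa", "ENERGA"),
   ("polskie sieci elektroenergetyczne", "PSE"), ("pse", "PSE"),
   ("aldesa", "ALDESA"), ("altis", "ALTIS"),
   ("emca volt", "EMCA"), ("emca", "EMCA")]

-- ===== PORT A =====
-- 'for alias, canonical in sorted(...): if alias in low: return canonical' = find? over the sorted list
def normalize_operator_py (raw : String) : String :=
  if raw = "" then ""
  else
    let low := PySem.Str.strip (PySem.Str.lower raw)
    match List.find? (fun ac => PySem.Str.isIn ac.1 low)
        (PySem.List.sorted pvOperatorAliases (fun ac => -(PySem.Str.len ac.1 : Int)) false) with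
    | some ac => ac.2
    | none =>
      match PySem.List.pyGet? (PySem.Str.split₀ raw) 0 with
      | some w => PySem.Str.upper w
      | none => ""   -- Python raises IndexError here; excluded by Pre_

-- ===== PORT B =====
-- 'max(len(a) for a in OPERATOR_ALIASES)' = max? over the keys' lengths;
-- the nested 'for n in range(max_len, 0, -1): for alias, canonical in ...items(): if ...: return canonical'
-- = findSome? over the countdown range of a find? over the dict items
def normalize_operator_py_alt (raw : String) : String :=
  if raw = "" then ""
  else
    let low := PySem.Str.strip (PySem.Str.lower raw)
    let maxLen : Int :=
      (PySem.List.max? (pvOperatorAliases.map (fun ac => (PySem.Str.len ac.1 : Int))) (fun n => n)).getD 0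
    match (PySem.List.pyRange maxLen 0 (-1)).findSome? (fun n =>
        (pvOperatorAliases.find? (fun ac =>
          (PySem.Str.len ac.1 : Int) == n && PySem.Str.isIn ac.1 low)).map (·.2)) with
    | some c => c
    | none =>
      match PySem.List.pyGet? (PySem.Str.split₀ raw) 0 with
      | some w => PySem.Str.upper w
      | none => ""   -- Python raises IndexError here; excluded by Pre_

-- ===== PRECONDITION & SPEC =====
-- Pre_ excludes exactly the non-empty whitespace-only strings, on which both Pythons raise
-- IndexError (raw.split() is empty and no alias matches the stripped-empty string).
def Pre_normalize_operator_py (raw : String) : Prop :=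
  raw = "" ∨ PySem.Str.split₀ raw ≠ []
instance (raw : String) : Decidable (Pre_normalize_operator_py raw) := by
  unfold Pre_normalize_operator_py; infer_instance
def pvWitness_normalize_operator_py : String := "Tauron Dystrybucja S.A."

def Spec_normalize_operator_py (raw : String) (out : String) : Prop := out = normalize_operator_py_alt raw
instance (raw : String) (out : String) : Decidable (Spec_normalize_operator_py raw out) := by unfold Spec_normalize_operator_py; infer_instance

-- ===== CLAIM (what is proved, stated in full; the proofs are below) =====
def Claim_equal_normalize_operator_py : Prop := ∀ (raw : String), Dom_normalize_operator_py raw → Pre_normalize_operator_py raw → Spec_normalize_operator_py raw (normalize_operator_py raw)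

-- ===== LEMMAS AND PROOFS =====

set_option maxRecDepth 4000

-- a conjunctive find? is a find? over the filtered list
theorem find?_and_eq_find?_filter {α : Type} (q p : α → Bool) (xs : List α) :
    List.find? (fun a => q a && p a) xs = List.find? p (xs.filter q) := by
  induction xs with
  | nil => rfl
  | cons x t ih =>
    by_cases hq : q x = true
    · by_cases hp : p x = true
      · rw [List.find?_cons_of_pos (by simp [hq, hp]), List.filter_cons_of_pos hq,
          List.find?_cons_of_pos hp]
      · rw [List.find?_cons_of_neg (by simp [hp]), List.filter_cons_of_pos hq,
          List.find?_cons_of_neg (by simpa using hp), ih]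
    · rw [List.find?_cons_of_neg (by simp [hq]), List.filter_cons_of_neg (by simpa using hq), ih]

-- scanning buckets in order and taking the first find? = a single find? over the concatenation
theorem findSome?_find?_flatten {α β : Type} (p : α → Bool) (f : α → β) (bs : List (List α)) :
    List.findSome? (fun b => (List.find? p b).map f) bs = (List.find? p bs.flatten).map f := by
  induction bs with
  | nil => rfl
  | cons b t ih =>
    simp only [List.findSome?, List.flatten_cons, List.find?_append]
    cases List.find? p b <;> simp [ih]

theorem pv_ports_eq (raw : String) :
    normalize_operator_py raw = normalize_operator_py_alt raw := by
  unfold normalize_operator_py normalize_operator_py_alt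
  by_cases h : raw = ""
  · simp [h]
  · simp only [h, if_false]
    set low := PySem.Str.strip (PySem.Str.lower raw) with hlow
    set p : String × String → Bool := fun ac => PySem.Str.isIn ac.1 low with hp
    -- B's loop: pull the length test out as a filter, then collapse the buckets
    have hB : (PySem.List.pyRange
          ((PySem.List.max? (pvOperatorAliases.map (fun ac => (PySem.Str.len ac.1 : Int))) (fun n => n)).getD 0)
          0 (-1)).findSome? (fun n =>
          (pvOperatorAliases.find? (fun ac => (PySem.Str.len ac.1 : Int) == n && p ac)).map (·.2)) =
        (List.find? p ((PySem.List.pyRange 33 0 (-1)).map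
            (fun n => pvOperatorAliases.filter (fun ac => (PySem.Str.len ac.1 : Int) == n))).flatten).map (·.2) := by
      have hmax : (PySem.List.max? (pvOperatorAliases.map (fun ac => (PySem.Str.len ac.1 : Int))) (fun n => n)).getD 0 = (33 : Int) := by decide
      rw [hmax]
      have hfun : (fun n => (pvOperatorAliases.find? (fun ac =>
            (PySem.Str.len ac.1 : Int) == n && p ac)).map (·.2)) =
          (fun b => (List.find? p b).map (·.2)) ∘
            (fun n => pvOperatorAliases.filter (fun ac => (PySem.Str.len ac.1 : Int) == n)) := by
        funext n
        simp only [Function.comp]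
        rw [find?_and_eq_find?_filter]
      rw [hfun, ← List.findSome?_map, findSome?_find?_flatten]
    rw [hB]
    -- both sides are now find? p over a concrete list; the two concrete lists coincide
    have hlists : ((PySem.List.pyRange 33 0 (-1)).map
          (fun n => pvOperatorAliases.filter (fun ac => (PySem.Str.len ac.1 : Int) == n))).flatten =
        PySem.List.sorted pvOperatorAliases (fun ac => -(PySem.Str.len ac.1 : Int)) false := by decide
    rw [hlists]
    cases List.find? p (PySem.List.sorted pvOperatorAliases (fun ac => -(PySem.Str.len ac.1 : Int)) false) <;> rfl

-- ===== VERDICT (by name: the statement is the Claim_ definition above) =====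
theorem normalize_operator_py_spec : Claim_equal_normalize_operator_py := by
  intro raw _ _
  unfold Spec_normalize_operator_py
  exact pv_ports_eq raw
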